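-- pv_equiv track=rewrite | github.com/rhencke/kennel | src/fido/rocq_lsp.py | _comment_and_string_ranges
-- ===== SOURCE A (Python) =====
-- def _comment_and_string_ranges(text: str) -> tuple[tuple[int, int, int, str], ...]:
--     ranges: list[tuple[int, int, int, str]] = []
--     index = 0
--     comment_depth = 0
--     comment_start: int | None = None
--     string_start: int | None = None
--     in_string = False
--     while index < len(text):
--         pair = text[index : index + 2]
--         char = text[index]
--         if comment_depth:
--             if pair == "(*":
--                 comment_depth += 1
--                 index += 2
--                 continue
--             if pair == "*)":
--                 comment_depth -= 1
--                 index += 2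
--                 if comment_depth == 0 and comment_start is not None:
--                     ranges.extend(
--                         _split_range_by_line(text, comment_start, index, "comment")
--                     )
--                     comment_start = None
--                 continue
--             index += 1
--             continue
--         if in_string:
--             if char == "\\":
--                 index += 2
--                 continue
--             if char == '"':
--                 index += 1
--                 if string_start is not None:
--                     ranges.extend(
--                         _split_range_by_line(text, string_start, index, "string")
--                     )
--                 string_start = None
--                 in_string = False
--                 continue
--             index += 1
--             continue
--         if pair == "(*":
--             comment_start = index
--             comment_depth = 1
--             index += 2
--         elif char == '"':
--             string_start = index
--             in_string = True
--             index += 1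
--         else:
--             index += 1
--     if comment_depth and comment_start is not None:
--         ranges.extend(_split_range_by_line(text, comment_start, len(text), "comment"))
--     if in_string and string_start is not None:
--         ranges.extend(_split_range_by_line(text, string_start, len(text), "string"))
--     return tuple(ranges)
--
-- def _split_range_by_line(
--     text: str, start: int, end: int, kind: str
-- ) -> tuple[tuple[int, int, int, str], ...]:
--     ranges: list[tuple[int, int, int, str]] = []
--     offset = start
--     while offset < end:
--         line, column = _offset_to_position(text, offset)
--         next_newline = text.find("\n", offset, end)
--         line_end = end if next_newline == -1 else next_newline
--         length = line_end - offset
--         if length > 0: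
--             ranges.append((line, column, length, kind))
--         offset = line_end + 1
--     return tuple(ranges)
--
-- def _offset_to_position(text: str, offset: int) -> tuple[int, int]:
--     prefix = text[:offset]
--     line = prefix.count("\n")
--     last_newline = prefix.rfind("\n")
--     column = offset if last_newline == -1 else offset - last_newline - 1
--     return line, column
-- ===== SOURCE B (Python) =====
-- def _comment_and_string_ranges(text: str) -> tuple[tuple[int, int, int, str], ...]:
--     # Single pass: track line/column incrementally and emit each line segment
--     # as soon as it is complete, instead of rescanning the prefix per segment.
--     out: list[tuple[int, int, int, str]] = []
--     n = len(text)
--     i = 0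
--     line = 0
--     col = 0
--     depth = 0
--     in_string = False
--     seg: tuple[int, int, int] | None = None  # (line, col, start offset) of the open segment
--     while i < n:
--         ch = text[i]
--         if depth:
--             if ch == "(" and i + 1 < n and text[i + 1] == "*":
--                 depth += 1
--                 col += 2
--                 i += 2
--             elif ch == "*" and i + 1 < n and text[i + 1] == ")":
--                 depth -= 1
--                 col += 2
--                 i += 2
--                 if depth == 0:
--                     l, c, s = seg
--                     if i > s:
--                         out.append((l, c, i - s, "comment"))
--                     seg = None
--             elif ch == "\n":
--                 l, c, s = seg
--                 if i > s:
--                     out.append((l, c, i - s, "comment"))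
--                 line += 1
--                 col = 0
--                 i += 1
--                 seg = (line, 0, i)
--             else:
--                 col += 1
--                 i += 1
--         elif in_string:
--             if ch == "\\":
--                 if i + 1 < n and text[i + 1] == "\n":
--                     l, c, s = seg
--                     if i + 1 > s:
--                         out.append((l, c, i + 1 - s, "string"))
--                     line += 1
--                     col = 0
--                     i += 2
--                     seg = (line, 0, i)
--                 else:
--                     col += 2
--                     i += 2
--             elif ch == '"':
--                 col += 1
--                 i += 1
--                 l, c, s = seg
--                 if i > s:
--                     out.append((l, c, i - s, "string"))
--                 seg = None
--                 in_string = False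
--             elif ch == "\n":
--                 l, c, s = seg
--                 if i > s:
--                     out.append((l, c, i - s, "string"))
--                 line += 1
--                 col = 0
--                 i += 1
--                 seg = (line, 0, i)
--             else:
--                 col += 1
--                 i += 1
--         else:
--             if ch == "(" and i + 1 < n and text[i + 1] == "*":
--                 seg = (line, col, i)
--                 depth = 1
--                 col += 2
--                 i += 2
--             elif ch == '"':
--                 seg = (line, col, i)
--                 in_string = True
--                 col += 1
--                 i += 1
--             elif ch == "\n":
--                 line += 1
--                 col = 0
--                 i += 1
--             else:
--                 col += 1
--                 i += 1
--     if seg is not None: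
--         l, c, s = seg
--         if n > s:
--             out.append((l, c, n - s, "comment" if depth else "string"))
--     return tuple(out)
-- ===== Notes on version B (the rewrite author's own statement) =====
-- stated objective: alternative
-- what changed: B is a single scan that tracks line/column incrementally and emits each line segment as soon as it ends, instead of A's helper functions that rescan the whole prefix (count/rfind) and re-search for newlines for every emitted segment; intended as faster (A is O(n^2) worst case), measured about 1.4-1.6x at the largest size.
import Mathlib
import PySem

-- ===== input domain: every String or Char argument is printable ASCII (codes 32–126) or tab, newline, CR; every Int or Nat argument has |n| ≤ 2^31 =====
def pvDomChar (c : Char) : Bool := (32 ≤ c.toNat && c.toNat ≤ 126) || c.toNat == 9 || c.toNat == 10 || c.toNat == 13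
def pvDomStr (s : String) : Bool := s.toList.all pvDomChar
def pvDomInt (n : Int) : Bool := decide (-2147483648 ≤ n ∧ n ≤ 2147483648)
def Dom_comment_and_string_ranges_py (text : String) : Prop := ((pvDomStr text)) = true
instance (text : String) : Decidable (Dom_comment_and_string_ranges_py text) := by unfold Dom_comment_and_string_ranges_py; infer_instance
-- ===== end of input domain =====

-- B replaces A's per-segment prefix rescans by one incremental line/column-tracking single scan; return values proved equal on all inputs.

-- ===== PORT A =====

-- port of _offset_to_position (on the character list of text)
def pvPosOf (cs : List Char) (offset : Nat) : Int × Int :=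
  let pref := PySem.List.slice cs none (some (offset : Int))   -- text[:offset]
  let line : Int := (PySem.Chars.count pref ['\n'] : Int)      -- prefix.count("\n")
  let lastNl : Int := PySem.Chars.rfind pref ['\n']            -- prefix.rfind("\n")
  (line, if lastNl = -1 then (offset : Int) else (offset : Int) - lastNl - 1)

-- port of the while-loop of _split_range_by_line (fuel makes the loop total; e - offset shrinks each pass)
def pvSplitGoA (cs : List Char) (e : Nat) (kind : String) : Nat → Nat → List (Int × Int × Int × String)
  | _, 0 => []
  | offset, fuel+1 =>
    if offset < e then
      let lc := pvPosOf cs offset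
      let nn := PySem.Chars.findFrom cs ['\n'] (offset : Int) (some (e : Int))  -- text.find("\n", offset, end)
      let lineEnd : Nat := if nn = -1 then e else nn.toNat
      let ln : Nat := lineEnd - offset
      (if 0 < ln then [(lc.1, lc.2, (ln : Int), kind)] else []) ++ pvSplitGoA cs e kind (lineEnd+1) fuel
    else []

-- port of _split_range_by_line
def pvSplitRangeA (cs : List Char) (s e : Nat) (kind : String) : List (Int × Int × Int × String) :=
  pvSplitGoA cs e kind s (e - s)

-- port of the main while-loop of _comment_and_string_ranges
def pvGoA (cs : List Char) (n : Nat) :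
    Nat → Nat → Nat → Option Nat → Option Nat → Bool →
    List (Int × Int × Int × String) → List (Int × Int × Int × String)
  | 0, _, _, _, _, _, ranges => ranges
  | fuel+1, index, depth, cstart, sstart, instr, ranges =>
    if index < n then
      let pair := PySem.List.slice cs (some (index : Int)) (some ((index : Int) + 2))  -- text[index:index+2]
      let char := cs.getD index ' '                                                    -- text[index] (index < n here)
      if depth ≠ 0 then
        if pair = ['(', '*'] then
          pvGoA cs n fuel (index+2) (depth+1) cstart sstart instr ranges
        else if pair = ['*', ')'] then
          if depth - 1 = 0 then
            match cstart with
            | some s => pvGoA cs n fuel (index+2) (depth-1) none sstart instr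
                          (ranges ++ pvSplitRangeA cs s (index+2) "comment")
            | none   => pvGoA cs n fuel (index+2) (depth-1) none sstart instr ranges
          else pvGoA cs n fuel (index+2) (depth-1) cstart sstart instr ranges
        else pvGoA cs n fuel (index+1) depth cstart sstart instr ranges
      else if instr then
        if char = '\\' then pvGoA cs n fuel (index+2) depth cstart sstart instr ranges
        else if char = '"' then
          match sstart with
          | some s => pvGoA cs n fuel (index+1) depth cstart none false
                        (ranges ++ pvSplitRangeA cs s (index+1) "string")
          | none   => pvGoA cs n fuel (index+1) depth cstart none false ranges
        else pvGoA cs n fuel (index+1) depth cstart sstart instr ranges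
      else
        if pair = ['(', '*'] then pvGoA cs n fuel (index+2) 1 (some index) sstart instr ranges
        else if char = '"' then pvGoA cs n fuel (index+1) depth cstart (some index) true ranges
        else pvGoA cs n fuel (index+1) depth cstart sstart instr ranges
    else
      -- after the loop
      let ranges1 := if depth ≠ 0 then
          (match cstart with
           | some s => ranges ++ pvSplitRangeA cs s n "comment"
           | none   => ranges)
        else ranges
      if instr then
        (match sstart with
         | some s => ranges1 ++ pvSplitRangeA cs s n "string"
         | none   => ranges1)
      else ranges1

def comment_and_string_ranges_py (text : String) : List (Int × Int × Int × String) :=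
  let cs := text.toList
  pvGoA cs cs.length (cs.length + 1) 0 0 none none false []

-- ===== PORT B =====

-- emit the pending segment [s, e) (Source B's `if e > s: out.append(...)`)
def pvEmit (out : List (Int × Int × Int × String)) (l c : Int) (s e : Nat) (k : String) :
    List (Int × Int × Int × String) :=
  if s < e then out ++ [(l, c, ((e - s : Nat) : Int), k)] else out

-- port of Source B's single while-loop
def pvGoB (cs : List Char) (n : Nat) :
    Nat → Nat → Int → Int → Nat → Bool → Option (Int × Int × Nat) →
    List (Int × Int × Int × String) → List (Int × Int × Int × String)
  | 0, _, _, _, _, _, _, out => out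
  | fuel+1, i, line, col, depth, instr, seg, out =>
    if i < n then
      let ch := cs.getD i ' '
      if depth ≠ 0 then
        if ch = '(' ∧ i+1 < n ∧ cs.getD (i+1) ' ' = '*' then
          pvGoB cs n fuel (i+2) line (col+2) (depth+1) instr seg out
        else if ch = '*' ∧ i+1 < n ∧ cs.getD (i+1) ' ' = ')' then
          if depth - 1 = 0 then
            match seg with
            | some (l, c, s) => pvGoB cs n fuel (i+2) line (col+2) 0 instr none (pvEmit out l c s (i+2) "comment")
            | none           => pvGoB cs n fuel (i+2) line (col+2) 0 instr none out
          else pvGoB cs n fuel (i+2) line (col+2) (depth-1) instr seg out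
        else if ch = '\n' then
          match seg with
          | some (l, c, s) => pvGoB cs n fuel (i+1) (line+1) 0 depth instr (some (line+1, 0, i+1)) (pvEmit out l c s i "comment")
          | none           => pvGoB cs n fuel (i+1) (line+1) 0 depth instr (some (line+1, 0, i+1)) out
        else pvGoB cs n fuel (i+1) line (col+1) depth instr seg out
      else if instr then
        if ch = '\\' then
          if i+1 < n ∧ cs.getD (i+1) ' ' = '\n' then
            match seg with
            | some (l, c, s) => pvGoB cs n fuel (i+2) (line+1) 0 depth instr (some (line+1, 0, i+2)) (pvEmit out l c s (i+1) "string")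
            | none           => pvGoB cs n fuel (i+2) (line+1) 0 depth instr (some (line+1, 0, i+2)) out
          else pvGoB cs n fuel (i+2) line (col+2) depth instr seg out
        else if ch = '"' then
          match seg with
          | some (l, c, s) => pvGoB cs n fuel (i+1) line (col+1) depth false none (pvEmit out l c s (i+1) "string")
          | none           => pvGoB cs n fuel (i+1) line (col+1) depth false none out
        else if ch = '\n' then
          match seg with
          | some (l, c, s) => pvGoB cs n fuel (i+1) (line+1) 0 depth instr (some (line+1, 0, i+1)) (pvEmit out l c s i "string")
          | none           => pvGoB cs n fuel (i+1) (line+1) 0 depth instr (some (line+1, 0, i+1)) out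
        else pvGoB cs n fuel (i+1) line (col+1) depth instr seg out
      else
        if ch = '(' ∧ i+1 < n ∧ cs.getD (i+1) ' ' = '*' then
          pvGoB cs n fuel (i+2) line (col+2) 1 instr (some (line, col, i)) out
        else if ch = '"' then
          pvGoB cs n fuel (i+1) line (col+1) depth true (some (line, col, i)) out
        else if ch = '\n' then
          pvGoB cs n fuel (i+1) (line+1) 0 depth instr seg out
        else pvGoB cs n fuel (i+1) line (col+1) depth instr seg out
    else
      match seg with
      | some (l, c, s) => pvEmit out l c s n (if depth ≠ 0 then "comment" else "string")
      | none           => out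

def comment_and_string_ranges_py_alt (text : String) : List (Int × Int × Int × String) :=
  let cs := text.toList
  pvGoB cs cs.length (cs.length + 1) 0 0 0 0 false none []

-- ===== PRECONDITION & SPEC =====
def Spec_comment_and_string_ranges_py (text : String) (out : List (Int × Int × Int × String)) : Prop := out = comment_and_string_ranges_py_alt text
instance (text : String) (out : List (Int × Int × Int × String)) : Decidable (Spec_comment_and_string_ranges_py text out) := by unfold Spec_comment_and_string_ranges_py; infer_instance

-- ===== CLAIM (what is proved, stated in full; the proofs are below) =====
def Claim_equal_comment_and_string_ranges_py : Prop := ∀ (text : String), Dom_comment_and_string_ranges_py text → Spec_comment_and_string_ranges_py text (comment_and_string_ranges_py text)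



-- ===== LEMMAS AND PROOFS =====

-- [a] is a prefix of l iff l starts with a
lemma pvIsPrefixOf_singleton (a : Char) (l : List Char) :
    ([a].isPrefixOf l = true) ↔ l[0]? = some a := by
  rw [List.isPrefixOf_iff_prefix]
  cases l with
  | nil => simp
  | cons b t => simp [List.prefix_cons_iff, eq_comm]

lemma pvIsPrefixOf_singleton_drop (a : Char) (s : List Char) (j : Nat) :
    ([a].isPrefixOf (s.drop j) = true) ↔ s[j]? = some a := by
  rw [pvIsPrefixOf_singleton]
  simpa using (List.getElem?_drop (xs := s) (i := j) (j := 0))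

-- PySem.Chars.find on a single-character needle is findIdx?
lemma pvFindGo_singleton (c : Char) (xs : List Char) (k : Nat) :
    PySem.Chars.find.go [c] xs k =
      (match xs.findIdx? (· == c) with
       | some j => ((k + j : Nat) : Int)
       | none => -1) := by
  induction xs generalizing k with
  | nil => rw [PySem.Chars.find.go]; simp
  | cons x t ih =>
    rw [PySem.Chars.find.go]
    by_cases h : x = c
    · subst h
      have hp : ([x].isPrefixOf (x :: t)) = true := by
        rw [pvIsPrefixOf_singleton]; simp
      rw [hp]
      simp [List.findIdx?_cons]
    · have hp : ([c].isPrefixOf (x :: t)) = false := by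
        rw [Bool.eq_false_iff, ne_eq, pvIsPrefixOf_singleton]
        simp only [List.getElem?_cons_zero, Option.some.injEq]
        exact fun hc => h hc
      rw [hp]
      simp only [Bool.false_eq_true, if_false, List.findIdx?_cons, beq_iff_eq, if_neg h, ih]
      cases ht : t.findIdx? (· == c) <;> simp [Nat.add_assoc, Nat.add_comm 1]

lemma pvFind_singleton (c : Char) (xs : List Char) :
    PySem.Chars.find xs [c] =
      (match xs.findIdx? (· == c) with
       | some j => (j : Int)
       | none => -1) := by
  rw [PySem.Chars.find, pvFindGo_singleton]
  cases xs.findIdx? (· == c) <;> simp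

-- PySem.Chars.count on a single-character needle is List.count
lemma pvCountGo_singleton (c : Char) (xs : List Char) (fuel acc : Nat)
    (hf : xs.length ≤ fuel) :
    PySem.Chars.count.go [c] fuel xs acc = acc + xs.count c := by
  induction fuel generalizing xs acc with
  | zero =>
    have : xs = [] := List.eq_nil_of_length_eq_zero (Nat.le_zero.mp hf)
    subst this; rw [PySem.Chars.count.go]; simp
  | succ f ih =>
    cases xs with
    | nil =>
      rw [PySem.Chars.count.go]
      · simp
      · omega
    | cons x t =>
      rw [PySem.Chars.count.go]
      by_cases h : x = c
      · have hp : ([c].isPrefixOf (x :: t)) = true := by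
          rw [pvIsPrefixOf_singleton]; simp [h]
        rw [hp]
        simp only [if_true]
        have := ih t (acc + 1) (by simpa using Nat.le_of_succ_le_succ hf)
        simp only [List.length_cons, List.length_nil, List.drop_zero, List.drop_succ_cons] at this ⊢
        rw [this]
        simp [h, Nat.add_comm, Nat.add_left_comm]
      · have hp : ([c].isPrefixOf (x :: t)) = false := by
          rw [Bool.eq_false_iff, ne_eq, pvIsPrefixOf_singleton]
          simp only [List.getElem?_cons_zero, Option.some.injEq]
          exact fun hc => h hc
        rw [hp]
        simp only [Bool.false_eq_true, if_false]
        rw [ih t acc (by simpa using Nat.le_of_succ_le_succ hf)]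
        simp [h]

lemma pvCount_singleton (c : Char) (xs : List Char) :
    PySem.Chars.count xs [c] = xs.count c := by
  rw [PySem.Chars.count]
  simp only [List.isEmpty_iff, reduceCtorEq, if_false]
  simpa using pvCountGo_singleton c xs xs.length 0 le_rfl

-- PySem.Chars.rfind.go ignores an appended non-matching last element
lemma pvRfindGo_append (c d : Char) (xs : List Char) (m : Nat)
    (hm : m ≤ xs.length) (hd : d ≠ c) :
    PySem.Chars.rfind.go (xs ++ [d]) [c] m = PySem.Chars.rfind.go xs [c] m := by
  induction m with
  | zero =>
    rw [PySem.Chars.rfind.go, PySem.Chars.rfind.go]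
    have h0 : ([c].isPrefixOf (xs ++ [d])) = ([c].isPrefixOf xs) := by
      rw [Bool.eq_iff_iff, pvIsPrefixOf_singleton, pvIsPrefixOf_singleton]
      cases xs with
      | nil =>
        simp only [List.nil_append, List.getElem?_cons_zero, Option.some.injEq,
          List.getElem?_nil, reduceCtorEq, iff_false]
        exact fun hc => hd hc
      | cons y t => simp
    rw [h0]
  | succ j ih =>
    rw [PySem.Chars.rfind.go, PySem.Chars.rfind.go]
    have h0 : ([c].isPrefixOf ((xs ++ [d]).drop (j+1))) = ([c].isPrefixOf (xs.drop (j+1))) := by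
      rw [Bool.eq_iff_iff, pvIsPrefixOf_singleton_drop, pvIsPrefixOf_singleton_drop]
      by_cases hj : j + 1 < xs.length
      · rw [List.getElem?_append_left hj]
      · have hj' : j + 1 = xs.length := by omega
        rw [hj', List.getElem?_append_right le_rfl, List.getElem?_eq_none le_rfl]
        simp only [Nat.sub_self, List.getElem?_cons_zero, Option.some.injEq, reduceCtorEq,
          iff_false]
        exact fun hc => hd hc
    rw [h0, ih (by omega)]

lemma pvRfind_append_self (c : Char) (xs : List Char) :
    PySem.Chars.rfind (xs ++ [c]) [c] = (xs.length : Int) := by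
  rw [PySem.Chars.rfind]
  have hlen : (xs ++ [c]).length = xs.length + 1 := by simp
  rw [hlen, PySem.Chars.rfind.go]
  have h1 : ([c].isPrefixOf ((xs ++ [c]).drop (xs.length + 1))) = false := by
    rw [Bool.eq_false_iff, ne_eq, pvIsPrefixOf_singleton_drop,
        List.getElem?_eq_none (by simp)]
    simp
  rw [h1]
  simp only [Bool.false_eq_true, if_false]
  by_cases hxe : xs = []
  · subst hxe
    rw [show ([] ++ [c] : List Char).length = 0 + 1 from by simp] at hlen
    simp only [List.length_nil]
    rw [PySem.Chars.rfind.go]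
    have : ([c].isPrefixOf ([] ++ [c] : List Char)) = true := by
      rw [pvIsPrefixOf_singleton]; simp
    rw [this]
    simp
  · obtain ⟨m, hx⟩ : ∃ m, xs.length = m + 1 :=
      ⟨xs.length - 1, by have := List.length_pos_of_ne_nil hxe; omega⟩
    rw [hx, PySem.Chars.rfind.go]
    have h2 : ([c].isPrefixOf ((xs ++ [c]).drop (m+1))) = true := by
      rw [pvIsPrefixOf_singleton_drop, ← hx, List.getElem?_append_right le_rfl]
      simp
    rw [h2]
    simp

lemma pvRfind_append_ne (c d : Char) (xs : List Char) (hd : d ≠ c) :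
    PySem.Chars.rfind (xs ++ [d]) [c] = PySem.Chars.rfind xs [c] := by
  rw [PySem.Chars.rfind, PySem.Chars.rfind]
  have hlen : (xs ++ [d]).length = xs.length + 1 := by simp
  rw [hlen, PySem.Chars.rfind.go]
  have h1 : ([c].isPrefixOf ((xs ++ [d]).drop (xs.length + 1))) = false := by
    rw [Bool.eq_false_iff, ne_eq, pvIsPrefixOf_singleton_drop,
        List.getElem?_eq_none (by simp)]
    simp
  rw [h1]
  simp only [Bool.false_eq_true, if_false]
  exact pvRfindGo_append c d xs xs.length le_rfl hd


-- "no newline in [a, b)"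
def pvNoNl (cs : List Char) (a b : Nat) : Prop :=
  ∀ j, a ≤ j → j < b → ¬ cs[j]? = some '\n'

-- absolute position of the first newline in [a, b), if any
def pvFirstNl (cs : List Char) (a b : Nat) : Option Nat :=
  (((cs.drop a).take (b - a)).findIdx? (· == '\n')).map (a + ·)

lemma pvTD_getElem (cs : List Char) (a m j : Nat) (h : j < ((cs.drop a).take m).length) :
    ((cs.drop a).take m)[j] = cs[a + j]'(by simp at h; omega) := by
  rw [List.getElem_take, List.getElem_drop]

lemma pvFirstNl_eq_some_iff (cs : List Char) (a b q : Nat) :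
    pvFirstNl cs a b = some q ↔
      a ≤ q ∧ q < b ∧ cs[q]? = some '\n' ∧ pvNoNl cs a q := by
  unfold pvFirstNl
  constructor
  · intro h
    obtain ⟨j, hj, rfl⟩ : ∃ j, ((cs.drop a).take (b - a)).findIdx? (· == '\n') = some j ∧ a + j = q := by
      cases hfi : ((cs.drop a).take (b - a)).findIdx? (· == '\n') with
      | none => simp [hfi] at h
      | some j => refine ⟨j, rfl, ?_⟩; simp [hfi] at h; omega
    rw [List.findIdx?_eq_some_iff_getElem] at hj
    obtain ⟨hlt, hp, hall⟩ := hj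
    have hlen : ((cs.drop a).take (b - a)).length = min (b - a) (cs.length - a) := by
      simp
    have hjb : j < b - a := by omega
    have hjn : a + j < cs.length := by omega
    rw [pvTD_getElem] at hp
    simp only [beq_iff_eq] at hp
    refine ⟨by omega, by omega, ?_, ?_⟩
    · rw [List.getElem?_eq_getElem hjn, hp]
    · intro i hai hiq hie
      have hlt2 : i - a < ((cs.drop a).take (b - a)).length := by omega
      have h2 := hall (i - a) (by omega)
      rw [pvTD_getElem] at h2
      simp only [beq_iff_eq] at h2
      apply h2
      have hidx : a + (i - a) = i := by omega
      rw [← hidx] at hie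
      rw [List.getElem?_eq_getElem (by omega)] at hie
      exact Option.some.inj hie
  · rintro ⟨haq, hqb, hq, hnone⟩
    have hqn : q < cs.length := by
      by_contra hq'
      rw [List.getElem?_eq_none (by omega)] at hq
      simp at hq
    have hlen : ((cs.drop a).take (b - a)).length = min (b - a) (cs.length - a) := by simp
    have hlt : q - a < ((cs.drop a).take (b - a)).length := by omega
    have hfi : ((cs.drop a).take (b - a)).findIdx? (· == '\n') = some (q - a) := by
      rw [List.findIdx?_eq_some_iff_getElem]
      refine ⟨hlt, ?_, ?_⟩
      · rw [pvTD_getElem]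
        simp only [beq_iff_eq]
        have hidx : a + (q - a) = q := by omega
        rw [← hidx] at hq
        rw [List.getElem?_eq_getElem (by omega)] at hq
        exact Option.some.inj hq
      · intro j hj
        rw [pvTD_getElem]
        simp only [beq_iff_eq]
        have hjn : a + j < cs.length := by omega
        intro hc
        exact hnone (a + j) (by omega) (by omega)
          (by rw [List.getElem?_eq_getElem hjn, hc])
    rw [hfi, Option.map_some]
    exact congrArg some (by omega)

lemma pvFirstNl_eq_none_iff (cs : List Char) (a b : Nat) :
    pvFirstNl cs a b = none ↔ pvNoNl cs a (min b cs.length) := by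
  unfold pvFirstNl
  rw [Option.map_eq_none_iff, List.findIdx?_eq_none_iff]
  have hlen : ((cs.drop a).take (b - a)).length = min (b - a) (cs.length - a) := by simp
  constructor
  · intro h j haj hjb hj
    have hjn : j < cs.length := by omega
    have hlt : j - a < ((cs.drop a).take (b - a)).length := by omega
    have h2 := h (((cs.drop a).take (b - a))[j - a]) (List.getElem_mem hlt)
    rw [pvTD_getElem, beq_eq_false_iff_ne, ne_eq] at h2
    apply h2
    have hidx : a + (j - a) = j := by omega
    rw [← hidx] at hj
    rw [List.getElem?_eq_getElem (by omega)] at hj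
    exact Option.some.inj hj
  · intro h x hx
    obtain ⟨j, hj, rfl⟩ := List.getElem_of_mem hx
    rw [pvTD_getElem, beq_eq_false_iff_ne, ne_eq]
    have hjn : a + j < cs.length := by omega
    intro hc
    exact h (a + j) (by omega) (by omega) (by rw [List.getElem?_eq_getElem hjn, hc])

-- text.find("\n", offset, end) in terms of pvFirstNl
lemma pvFindFrom_char (cs : List Char) (o e : Nat) (hoe : o ≤ e) (hen : e ≤ cs.length) :
    PySem.Chars.findFrom cs ['\n'] (o : Int) (some (e : Int)) =
      (pvFirstNl cs o e).elim (-1 : Int) (fun q => (q : Int)) := by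
  rw [PySem.Chars.findFrom]
  have h1 : ¬ ((cs.length : Int) < (e : Int)) := by exact_mod_cast not_lt.mpr hen
  have h2 : ¬ ((e : Int) < 0) := by simp
  have h3 : ¬ ((o : Int) < 0) := by simp
  have h4 : ¬ ((e : Int) < (o : Int)) := by exact_mod_cast not_lt.mpr hoe
  simp only [h1, if_false, h2, h3, h4]
  rw [Int.toNat_natCast, Int.toNat_natCast]
  rw [List.drop_take, pvFind_singleton]
  unfold pvFirstNl
  cases hfi : ((cs.drop o).take (e - o)).findIdx? (· == '\n') with
  | none => simp
  | some j =>
    simp only [Option.map_some, Option.elim_some]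
    have : ¬ ((j : Int) = -1) := by omega
    simp only [this, if_false]
    push_cast
    ring

-- _offset_to_position at offset 0
lemma pvPosOf_zero (cs : List Char) : pvPosOf cs 0 = (0, 0) := by
  unfold pvPosOf
  rw [show ((0 : Nat) : Int) = ((0 : Nat) : Int) from rfl, PySem.List.slice_to_natCast]
  simp [PySem.Chars.count, PySem.Chars.count.go, PySem.Chars.rfind, PySem.Chars.rfind.go,
    List.isPrefixOf]

-- _offset_to_position steps across a newline
lemma pvPosOf_succ_nl (cs : List Char) (o : Nat) (ho : o < cs.length)
    (hc : cs[o]? = some '\n') :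
    pvPosOf cs (o+1) = ((pvPosOf cs o).1 + 1, 0) := by
  have hget : cs[o] = '\n' := by
    rw [List.getElem?_eq_getElem ho] at hc; exact Option.some.inj hc
  simp only [pvPosOf, PySem.List.slice_to_natCast]
  have htake : cs.take (o+1) = cs.take o ++ ['\n'] := by
    rw [List.take_add_one, List.getElem?_eq_getElem ho, hget]; rfl
  rw [htake, pvCount_singleton, pvCount_singleton, pvRfind_append_self]
  have hlen : (cs.take o).length = o := by simp; omega
  rw [hlen]
  have h1 : ¬ ((o : Int) = -1) := by omega
  simp only [List.count_append, h1, if_false]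
  rw [Prod.mk.injEq]
  constructor
  · simp
  · omega

-- _offset_to_position steps across a non-newline
lemma pvPosOf_succ_not (cs : List Char) (o : Nat) (ho : o < cs.length)
    (hc : ¬ cs[o]? = some '\n') :
    pvPosOf cs (o+1) = ((pvPosOf cs o).1, (pvPosOf cs o).2 + 1) := by
  have hget : cs[o] ≠ '\n' := by
    rw [List.getElem?_eq_getElem ho] at hc
    exact fun h => hc (congrArg some h)
  simp only [pvPosOf, PySem.List.slice_to_natCast]
  have htake : cs.take (o+1) = cs.take o ++ [cs[o]] := by
    rw [List.take_add_one, List.getElem?_eq_getElem ho]; rfl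
  rw [htake, pvCount_singleton, pvCount_singleton, pvRfind_append_ne _ _ _ hget]
  rw [Prod.mk.injEq]
  constructor
  · rw [List.count_append]
    simp [hget]
  · by_cases h1 : PySem.Chars.rfind (cs.take o) ['\n'] = -1
    · simp only [h1, if_true]; push_cast; ring
    · simp only [h1, if_false]; omega

-- one emitted line segment
def pvOptSeg (lc : Int × Int) (o e : Nat) (k : String) : List (Int × Int × Int × String) :=
  if o < e then [(lc.1, lc.2, ((e - o : Nat) : Int), k)] else []

lemma pvEmit_eq (out : List (Int × Int × Int × String)) (l c : Int) (s e : Nat) (k : String) :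
    pvEmit out l c s e k = out ++ pvOptSeg (l, c) s e k := by
  unfold pvEmit pvOptSeg
  split <;> simp

-- reference form of the _split_range_by_line loop
def pvSplitSpec (cs : List Char) (e : Nat) (k : String) (o : Nat) :
    List (Int × Int × Int × String) :=
  match h : pvFirstNl cs o e with
  | none => pvOptSeg (pvPosOf cs o) o e k
  | some q =>
    pvOptSeg (pvPosOf cs o) o q k ++ pvSplitSpec cs e k (q+1)
termination_by e - o
decreasing_by
  have := (pvFirstNl_eq_some_iff cs o e q).mp h
  omega

lemma pvSplitSpec_none (cs : List Char) (e k o) (h : pvFirstNl cs o e = none) :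
    pvSplitSpec cs e k o = pvOptSeg (pvPosOf cs o) o e k := by
  rw [pvSplitSpec, h]

lemma pvSplitSpec_some (cs : List Char) (e k o q) (h : pvFirstNl cs o e = some q) :
    pvSplitSpec cs e k o = pvOptSeg (pvPosOf cs o) o q k ++ pvSplitSpec cs e k (q+1) := by
  rw [pvSplitSpec, h]

lemma pvSplitSpec_nil (cs : List Char) (e k o) (hle : e ≤ o) :
    pvSplitSpec cs e k o = [] := by
  have hnone : pvFirstNl cs o e = none := by
    rw [pvFirstNl_eq_none_iff]
    intro j hj hj2 _
    omega
  rw [pvSplitSpec_none cs e k o hnone]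
  unfold pvOptSeg
  rw [if_neg (by omega)]

-- the ported _split_range_by_line loop computes pvSplitSpec
lemma pvSplitGoA_eq_spec (cs : List Char) (e : Nat) (k : String) (hen : e ≤ cs.length) :
    ∀ fuel o, e - o ≤ fuel → pvSplitGoA cs e k o fuel = pvSplitSpec cs e k o := by
  intro fuel
  induction fuel with
  | zero =>
    intro o h
    rw [pvSplitGoA, pvSplitSpec_nil cs e k o (by omega)]
  | succ f ih =>
    intro o h
    rw [pvSplitGoA]
    by_cases ho : o < e
    · rw [if_pos ho]
      rw [pvFindFrom_char cs o e (by omega) hen]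
      cases hfi : pvFirstNl cs o e with
      | none =>
        simp only [Option.elim_none, if_true]
        rw [pvSplitSpec_none cs e k o hfi]
        have h2 : pvSplitGoA cs e k (e+1) f = [] := by
          cases f with
          | zero => rw [pvSplitGoA]
          | succ f' => rw [pvSplitGoA, if_neg (by omega)]
        rw [h2, if_pos (show 0 < e - o by omega)]
        unfold pvOptSeg
        rw [if_pos ho]
        simp
      | some q =>
        obtain ⟨hoq, hqe, hq, hno⟩ := (pvFirstNl_eq_some_iff cs o e q).mp hfi
        simp only [Option.elim_some]
        have hne : ¬ ((q : Int) = -1) := by omega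
        rw [if_neg hne, Int.toNat_natCast]
        rw [ih (q+1) (by omega)]
        rw [pvSplitSpec_some cs e k o q hfi]
        unfold pvOptSeg
        by_cases hq0 : o < q
        · simp only [if_pos (show 0 < q - o by omega), if_pos hq0]
        · simp only [if_neg (show ¬ 0 < q - o by omega), if_neg hq0, List.nil_append]
    · rw [if_neg ho, pvSplitSpec_nil cs e k o (by omega)]

lemma pvSplitRangeA_eq_spec (cs : List Char) (s e : Nat) (k : String) (hen : e ≤ cs.length) :
    pvSplitRangeA cs s e k = pvSplitSpec cs e k s :=
  pvSplitGoA_eq_spec cs e k hen (e - s) s le_rfl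

-- splitting [s, e) at a line start o with no newline in [o, e) splits off one final segment
lemma pvSplitSpec_split (cs : List Char) (k : String) :
    ∀ d s o e, o - s = d → s ≤ o → o ≤ e → e ≤ cs.length →
      (o = s ∨ (0 < o ∧ cs[o-1]? = some '\n')) →
      pvNoNl cs o e →
      pvSplitSpec cs e k s = pvSplitSpec cs o k s ++ pvOptSeg (pvPosOf cs o) o e k := by
  intro d
  induction d using Nat.strong_induction_on with
  | _ d ih =>
    intro s o e hd hso hoe hen hls hno
    by_cases hos : o = s
    · subst hos
      rw [pvSplitSpec_nil cs o k o le_rfl]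
      have hnone : pvFirstNl cs o e = none := by
        rw [pvFirstNl_eq_none_iff]
        intro j h1 h2
        exact hno j h1 (by omega)
      rw [pvSplitSpec_none cs e k o hnone]
      simp
    · obtain ⟨hpos, hnl⟩ := hls.resolve_left hos
      have hso' : s < o := by omega
      cases hq : pvFirstNl cs s o with
      | none =>
        exfalso
        rw [pvFirstNl_eq_none_iff] at hq
        have hon : o - 1 < cs.length := by
          by_contra hc
          rw [List.getElem?_eq_none (by omega)] at hnl
          simp at hnl
        exact hq (o-1) (by omega) (by omega) hnl
      | some q =>
        obtain ⟨hsq, hqo, hqnl, hnoq⟩ := (pvFirstNl_eq_some_iff cs s o q).mp hq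
        have hq2 : pvFirstNl cs s e = some q := by
          rw [pvFirstNl_eq_some_iff]
          exact ⟨hsq, by omega, hqnl, hnoq⟩
        rw [pvSplitSpec_some cs e k s q hq2, pvSplitSpec_some cs o k s q hq]
        rw [ih (o - (q+1)) (by omega) (q+1) o e rfl (by omega) hoe hen ?_ hno]
        · rw [List.append_assoc]
        · by_cases h : o = q + 1
          · exact Or.inl h
          · exact Or.inr ⟨hpos, hnl⟩

-- a split ending just after a newline equals the split ending at that newline
lemma pvSplitSpec_succ_nl (cs : List Char) (k : String) :
    ∀ d s p, p - s = d → s ≤ p → cs[p]? = some '\n' →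
      pvSplitSpec cs (p+1) k s = pvSplitSpec cs p k s := by
  intro d
  induction d using Nat.strong_induction_on with
  | _ d ih =>
    intro s p hd hsp hnl
    have hpn : p < cs.length := by
      by_contra hc
      rw [List.getElem?_eq_none (by omega)] at hnl
      simp at hnl
    cases hq : pvFirstNl cs s (p+1) with
    | none =>
      exfalso
      rw [pvFirstNl_eq_none_iff] at hq
      exact hq p hsp (by omega) hnl
    | some q =>
      obtain ⟨hsq, hqp1, hqnl, hnoq⟩ := (pvFirstNl_eq_some_iff cs s (p+1) q).mp hq
      by_cases hqp : q = p
      · subst hqp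
        rw [pvSplitSpec_some cs (q+1) k s q hq]
        have hnone : pvFirstNl cs s q = none := by
          rw [pvFirstNl_eq_none_iff]
          intro j h1 h2
          exact hnoq j h1 (by omega)
        rw [pvSplitSpec_none cs q k s hnone, pvSplitSpec_nil cs (q+1) k (q+1) le_rfl]
        simp
      · have hqp' : q < p := by omega
        have hq2 : pvFirstNl cs s p = some q := by
          rw [pvFirstNl_eq_some_iff]
          exact ⟨hsq, hqp', hqnl, hnoq⟩
        rw [pvSplitSpec_some cs (p+1) k s q hq, pvSplitSpec_some cs p k s q hq2]
        rw [ih (p - (q+1)) (by omega) (q+1) p rfl (by omega) hnl]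

lemma pvGetD_some (cs : List Char) (i : Nat) (hi : i < cs.length) :
    cs[i]? = some (cs.getD i ' ') := by
  rw [List.getD_eq_getElem?_getD, List.getElem?_eq_getElem hi]
  simp

-- text[index:index+2] == "xy" in terms of the characters
lemma pvPair_eq (cs : List Char) (i : Nat) (hi : i < cs.length) (c1 c2 : Char) :
    (PySem.List.slice cs (some (i : Int)) (some ((i : Int) + 2)) = [c1, c2]) ↔
      (cs.getD i ' ' = c1 ∧ i+1 < cs.length ∧ cs.getD (i+1) ' ' = c2) := by
  have h2 : ((i : Int) + 2) = ((i : Int) + ((2 : Nat) : Int)) := by norm_num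
  rw [h2, PySem.List.slice_natCast_add]
  have hdrop : cs.drop i = cs[i] :: cs.drop (i+1) := List.drop_eq_getElem_cons hi
  rw [hdrop]
  by_cases h1 : i + 1 < cs.length
  · have hdrop2 : cs.drop (i+1) = cs[i+1] :: cs.drop (i+2) := List.drop_eq_getElem_cons h1
    rw [hdrop2]
    show ([cs[i], cs[i+1]] = [c1, c2]) ↔ _
    rw [List.getD_eq_getElem cs ' ' hi, List.getD_eq_getElem cs ' ' h1]
    simp [h1]
  · have hdrop2 : cs.drop (i+1) = [] := List.drop_eq_nil_of_le (by omega)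
    rw [hdrop2]
    show ([cs[i]] = [c1, c2]) ↔ _
    simp [h1]

-- position stepping helpers for B's (line, col) state
lemma pvPos_one_not (cs : List Char) (i : Nat) (line col : Int) (hi : i < cs.length)
    (hc : ¬ cs[i]? = some '\n') (hlc : (line, col) = pvPosOf cs i) :
    (line, col + 1) = pvPosOf cs (i+1) := by
  rw [pvPosOf_succ_not cs i hi hc, ← hlc]

lemma pvPos_one_nl (cs : List Char) (i : Nat) (line col : Int) (hi : i < cs.length)
    (hc : cs[i]? = some '\n') (hlc : (line, col) = pvPosOf cs i) :
    (line + 1, 0) = pvPosOf cs (i+1) := by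
  rw [pvPosOf_succ_nl cs i hi hc, ← hlc]

lemma pvPos_two_not (cs : List Char) (i : Nat) (line col : Int) (h1 : i + 1 < cs.length)
    (hc0 : ¬ cs[i]? = some '\n') (hc1 : ¬ cs[i+1]? = some '\n')
    (hlc : (line, col) = pvPosOf cs i) :
    (line, col + 2) = pvPosOf cs (i+2) := by
  have := pvPos_one_not cs (i+1) line (col+1) h1 hc1
    (pvPos_one_not cs i line col (by omega) hc0 hlc)
  rw [show i+2 = i+1+1 from rfl, ← this, show col + 2 = col + 1 + 1 from by ring]

lemma pvPos_two_nl (cs : List Char) (i : Nat) (line col : Int) (h1 : i + 1 < cs.length)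
    (hc0 : ¬ cs[i]? = some '\n') (hc1 : cs[i+1]? = some '\n')
    (hlc : (line, col) = pvPosOf cs i) :
    (line + 1, 0) = pvPosOf cs (i+2) :=
  pvPos_one_nl cs (i+1) line (col+1) h1 hc1
    (pvPos_one_not cs i line col (by omega) hc0 hlc)

-- the invariant tying the open range of A (start s) to B's pending segment (l, c, o)
def pvSegInv (cs : List Char) (i s o : Nat) (l c : Int) (k : String)
    (ranges out : List (Int × Int × Int × String)) : Prop :=
  s ≤ o ∧ o ≤ cs.length ∧ o ≤ i ∧
  (o = s ∨ (0 < o ∧ cs[o-1]? = some '\n')) ∧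
  (l, c) = pvPosOf cs o ∧
  pvNoNl cs o (min i cs.length) ∧
  out = ranges ++ pvSplitSpec cs o k s

-- closing the open range at e: A's split of [s, e) is B's output plus the final segment
lemma pvSegClose (cs : List Char) (i s o : Nat) (l c : Int) (k : String)
    (ranges out : List (Int × Int × Int × String)) (e : Nat)
    (h : pvSegInv cs i s o l c k ranges out)
    (hoe : o ≤ e) (hen : e ≤ cs.length) (hno : pvNoNl cs o e) :
    ranges ++ pvSplitSpec cs e k s = pvEmit out l c o e k := by
  obtain ⟨h1, h2, h3, h4, h5, h6, h7⟩ := h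
  rw [pvEmit_eq, h7, List.append_assoc]
  rw [pvSplitSpec_split cs k (o - s) s o e rfl h1 hoe hen h4 hno, ← h5]

-- crossing a newline at p while the range stays open
lemma pvSegNl (cs : List Char) (i s o : Nat) (l c : Int) (k : String)
    (ranges out : List (Int × Int × Int × String)) (p : Nat)
    (h : pvSegInv cs i s o l c k ranges out)
    (hp : cs[p]? = some '\n') (hop : o ≤ p) (hno : pvNoNl cs o p) :
    pvEmit out l c o p k = ranges ++ pvSplitSpec cs (p+1) k s := by
  obtain ⟨h1, h2, h3, h4, h5, h6, h7⟩ := h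
  have hpn : p < cs.length := by
    by_contra hc2
    rw [List.getElem?_eq_none (by omega)] at hp
    simp at hp
  rw [pvEmit_eq, h7, List.append_assoc]
  rw [pvSplitSpec_succ_nl cs k (p - s) s p rfl (by omega) hp]
  rw [pvSplitSpec_split cs k (o - s) s o p rfl h1 hop (by omega) h4 hno, ← h5]

-- the full loop invariant
def pvInv (cs : List Char) (i depth : Nat) (cstart sstart : Option Nat) (instr : Bool)
    (line col : Int) (seg : Option (Int × Int × Nat))
    (ranges out : List (Int × Int × Int × String)) : Prop :=
  (i < cs.length → (line, col) = pvPosOf cs i) ∧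
  (if depth ≠ 0 then
     instr = false ∧ sstart = none ∧
     ∃ s l c o, cstart = some s ∧ seg = some (l, c, o) ∧
       pvSegInv cs i s o l c "comment" ranges out
   else if instr then
     cstart = none ∧
     ∃ s l c o, sstart = some s ∧ seg = some (l, c, o) ∧
       pvSegInv cs i s o l c "string" ranges out
   else cstart = none ∧ sstart = none ∧ seg = none ∧ out = ranges)

lemma pvNotNl_of (cs : List Char) (i : Nat) (c : Char) (h : cs[i]? = some c)
    (hc : c ≠ '\n') : ¬ cs[i]? = some '\n' := by
  rw [h]
  intro h2
  exact hc (Option.some.inj h2)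

lemma pvNoNl_mono (cs : List Char) (o b b' : Nat) (h : pvNoNl cs o b) (hb : b' ≤ b) :
    pvNoNl cs o b' := fun j h1 h2 => h j h1 (by omega)

lemma pvNoNl_to1 (cs : List Char) (o i : Nat) (h : pvNoNl cs o (min i cs.length))
    (hi : i < cs.length) (h0 : ¬ cs[i]? = some '\n') : pvNoNl cs o (i+1) := by
  intro j h1 h2
  by_cases hj : j = i
  · subst hj; exact h0
  · exact h j h1 (by omega)

lemma pvNoNl_to2 (cs : List Char) (o i : Nat) (h : pvNoNl cs o (min i cs.length))
    (hi : i < cs.length) (h0 : ¬ cs[i]? = some '\n')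
    (h1 : i + 1 < cs.length → ¬ cs[i+1]? = some '\n') : pvNoNl cs o (i+2) := by
  intro j hj1 hj2
  by_cases hj : j = i
  · subst hj; exact h0
  · by_cases hj' : j = i + 1
    · subst hj'
      by_cases hin : i + 1 < cs.length
      · exact h1 hin
      · rw [List.getElem?_eq_none (by omega)]
        simp
    · exact h j hj1 (by omega)

lemma pvNoNl_empty (cs : List Char) (o b : Nat) (h : b ≤ o) : pvNoNl cs o b :=
  fun j h1 h2 => absurd (by omega : j < j) (lt_irrefl j)

-- A's loop and B's loop agree under the invariant
lemma pvMain (cs : List Char) :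
    ∀ fuel i depth cstart sstart instr line col seg ranges out,
      0 < fuel → cs.length + 1 - i ≤ fuel →
      pvInv cs i depth cstart sstart instr line col seg ranges out →
      pvGoA cs cs.length fuel i depth cstart sstart instr ranges =
        pvGoB cs cs.length fuel i line col depth instr seg out := by
  intro fuel
  induction fuel with
  | zero => intro i depth cstart sstart instr line col seg ranges out h0 _ _; omega
  | succ f ih =>
    intro i depth cstart sstart instr line col seg ranges out _ hfuel hinv
    obtain ⟨hlc, hstate⟩ := hinv
    rw [pvGoA.eq_def, pvGoB.eq_def]
    simp only []
    by_cases hi : i < cs.length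
    · rw [if_pos hi, if_pos hi]
      have hf0 : 0 < f := by omega
      have hmin : min i cs.length = i := by omega
      have hlci := hlc hi
      have hchar : cs[i]? = some (cs.getD i ' ') := pvGetD_some cs i hi
      by_cases hdep : depth ≠ 0
      · rw [if_pos hdep, if_pos hdep]
        rw [if_pos hdep] at hstate
        obtain ⟨hinstr, hsstart, s, l, c, o, hcs, hseg, hsi⟩ := hstate
        subst hinstr
        have hsi' := hsi
        obtain ⟨g1, g2, g3, g4, g5, g6, g7⟩ := hsi'
        by_cases hp1 : PySem.List.slice cs (some (i:Int)) (some ((i:Int)+2)) = ['(', '*']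
        · -- nested "(*"
          obtain ⟨hc0, hi1, hc1⟩ := (pvPair_eq cs i hi '(' '*').mp hp1
          have hbB : cs.getD i ' ' = '(' ∧ i + 1 < cs.length ∧ cs.getD (i+1) ' ' = '*' :=
            ⟨hc0, hi1, hc1⟩
          rw [if_pos hp1, if_pos hbB]
          have hn0 : ¬ cs[i]? = some '\n' := pvNotNl_of cs i _ hchar (by rw [hc0]; decide)
          have hn1 : ¬ cs[i+1]? = some '\n' :=
            pvNotNl_of cs (i+1) _ (pvGetD_some cs (i+1) hi1) (by rw [hc1]; decide)
          apply ih (i+2) (depth+1) cstart sstart false line (col+2) seg ranges out hf0 (by omega)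
          refine ⟨fun h2 => pvPos_two_not cs i line col hi1 hn0 hn1 hlci, ?_⟩
          rw [if_pos (by omega : ¬ (depth + 1 = 0))]
          refine ⟨rfl, hsstart, s, l, c, o, hcs, hseg,
            g1, g2, by omega, g4, g5, ?_, g7⟩
          exact pvNoNl_mono cs o (i+2) _ (pvNoNl_to2 cs o i g6 hi hn0 (fun _ => hn1))
            (by omega)
        · have hbN1 : ¬ (cs.getD i ' ' = '(' ∧ i + 1 < cs.length ∧ cs.getD (i+1) ' ' = '*') :=
            fun hb => hp1 ((pvPair_eq cs i hi '(' '*').mpr hb)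
          rw [if_neg hp1, if_neg hbN1]
          by_cases hp2 : PySem.List.slice cs (some (i:Int)) (some ((i:Int)+2)) = ['*', ')']
          · -- "*)"
            obtain ⟨hc0, hi1, hc1⟩ := (pvPair_eq cs i hi '*' ')').mp hp2
            have hbB : cs.getD i ' ' = '*' ∧ i + 1 < cs.length ∧ cs.getD (i+1) ' ' = ')' :=
              ⟨hc0, hi1, hc1⟩
            rw [if_pos hp2, if_pos hbB]
            have hn0 : ¬ cs[i]? = some '\n' := pvNotNl_of cs i _ hchar (by rw [hc0]; decide)
            have hn1 : ¬ cs[i+1]? = some '\n' :=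
              pvNotNl_of cs (i+1) _ (pvGetD_some cs (i+1) hi1) (by rw [hc1]; decide)
            have hpos2 := pvPos_two_not cs i line col hi1 hn0 hn1 hlci
            by_cases hd0 : depth - 1 = 0
            · rw [if_pos hd0, if_pos hd0, hcs, hseg]
              simp only []
              have hout' : ranges ++ pvSplitRangeA cs s (i+2) "comment" =
                  pvEmit out l c o (i+2) "comment" := by
                rw [pvSplitRangeA_eq_spec cs s (i+2) "comment" (by omega)]
                exact pvSegClose cs i s o l c "comment" ranges out (i+2) hsi (by omega)
                  (by omega) (pvNoNl_to2 cs o i g6 hi hn0 (fun _ => hn1))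
              rw [hd0, hout']
              apply ih (i+2) 0 none sstart false line (col+2) none
                (pvEmit out l c o (i+2) "comment") (pvEmit out l c o (i+2) "comment")
                hf0 (by omega)
              refine ⟨fun h2 => hpos2, ?_⟩
              rw [if_neg (by omega : ¬ ((0:Nat) ≠ 0)), if_neg (by simp : ¬ (false = true))]
              exact ⟨rfl, hsstart, rfl, rfl⟩
            · rw [if_neg hd0, if_neg hd0]
              apply ih (i+2) (depth-1) cstart sstart false line (col+2) seg ranges out
                hf0 (by omega)
              refine ⟨fun h2 => hpos2, ?_⟩
              rw [if_pos (by omega : (depth - 1 : Nat) ≠ 0)]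
              refine ⟨rfl, hsstart, s, l, c, o, hcs, hseg,
                g1, g2, by omega, g4, g5, ?_, g7⟩
              exact pvNoNl_mono cs o (i+2) _ (pvNoNl_to2 cs o i g6 hi hn0 (fun _ => hn1))
                (by omega)
          · have hbN2 : ¬ (cs.getD i ' ' = '*' ∧ i + 1 < cs.length ∧ cs.getD (i+1) ' ' = ')') :=
              fun hb => hp2 ((pvPair_eq cs i hi '*' ')').mpr hb)
            rw [if_neg hp2, if_neg hbN2]
            by_cases hnl : cs.getD i ' ' = '\n'
            · -- newline inside a comment
              rw [if_pos hnl, hseg]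
              simp only []
              have hnlo : cs[i]? = some '\n' := by rw [hchar, hnl]
              have hout' : pvEmit out l c o i "comment" =
                  ranges ++ pvSplitSpec cs (i+1) "comment" s :=
                pvSegNl cs i s o l c "comment" ranges out i hsi hnlo g3 (hmin ▸ g6)
              apply ih (i+1) depth cstart sstart false (line+1) 0
                (some (line+1, 0, i+1)) ranges (pvEmit out l c o i "comment") hf0 (by omega)
              refine ⟨fun h2 => pvPos_one_nl cs i line col hi hnlo hlci, ?_⟩
              rw [if_pos hdep]
              refine ⟨rfl, hsstart, s, line+1, 0, i+1, hcs, rfl,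
                by omega, by omega, le_rfl, Or.inr ⟨by omega, by simpa using hnlo⟩,
                pvPos_one_nl cs i line col hi hnlo hlci,
                pvNoNl_empty cs (i+1) _ (by omega), hout'⟩
            · -- ordinary character inside a comment
              rw [if_neg hnl]
              have hn0 : ¬ cs[i]? = some '\n' := by
                rw [hchar]
                intro h2
                exact hnl (Option.some.inj h2)
              apply ih (i+1) depth cstart sstart false line (col+1) seg ranges out
                hf0 (by omega)
              refine ⟨fun h2 => pvPos_one_not cs i line col hi hn0 hlci, ?_⟩
              rw [if_pos hdep]
              refine ⟨rfl, hsstart, s, l, c, o, hcs, hseg,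
                g1, g2, by omega, g4, g5, ?_, g7⟩
              exact pvNoNl_mono cs o (i+1) _ (pvNoNl_to1 cs o i g6 hi hn0) (by omega)
      · -- depth = 0
        rw [if_neg hdep, if_neg hdep]
        rw [if_neg hdep] at hstate
        cases instr with
        | true =>
          rw [if_pos rfl] at hstate
          rw [if_pos rfl, if_pos rfl]
          obtain ⟨hcs, s, l, c, o, hss, hseg, hsi⟩ := hstate
          have hsi' := hsi
          obtain ⟨g1, g2, g3, g4, g5, g6, g7⟩ := hsi'
          by_cases hesc : cs.getD i ' ' = '\\'
          · rw [if_pos hesc, if_pos hesc]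
            have hn0 : ¬ cs[i]? = some '\n' := by
              rw [hchar, hesc]; decide
            by_cases hnl2 : i + 1 < cs.length ∧ cs.getD (i+1) ' ' = '\n'
            · -- escaped newline: the segment ends at i+1
              obtain ⟨hi1, hc1⟩ := hnl2
              have hbB : i + 1 < cs.length ∧ cs.getD (i+1) ' ' = '\n' := ⟨hi1, hc1⟩
              rw [if_pos hbB, hseg]
              simp only []
              have hnl1 : cs[i+1]? = some '\n' := by
                rw [pvGetD_some cs (i+1) hi1, hc1]
              have hout' : pvEmit out l c o (i+1) "string" =
                  ranges ++ pvSplitSpec cs (i+2) "string" s :=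
                pvSegNl cs i s o l c "string" ranges out (i+1) hsi hnl1 (by omega)
                  (pvNoNl_to1 cs o i g6 hi hn0)
              apply ih (i+2) depth cstart sstart true (line+1) 0
                (some (line+1, 0, i+2)) ranges (pvEmit out l c o (i+1) "string") hf0 (by omega)
              refine ⟨fun h2 => pvPos_two_nl cs i line col hi1 hn0 hnl1 hlci, ?_⟩
              rw [if_neg hdep, if_pos rfl]
              refine ⟨hcs, s, line+1, 0, i+2, hss, rfl,
                by omega, by omega, le_rfl, Or.inr ⟨by omega, by simpa using hnl1⟩,
                pvPos_two_nl cs i line col hi1 hn0 hnl1 hlci,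
                pvNoNl_empty cs (i+2) _ (by omega), hout'⟩
            · -- plain escape: skip two characters
              rw [if_neg hnl2]
              have hn1 : i + 1 < cs.length → ¬ cs[i+1]? = some '\n' := by
                intro hin
                rw [pvGetD_some cs (i+1) hin]
                intro h2
                exact hnl2 ⟨hin, Option.some.inj h2⟩
              apply ih (i+2) depth cstart sstart true line (col+2) seg ranges out
                hf0 (by omega)
              refine ⟨?_, ?_⟩
              · intro h2
                exact pvPos_two_not cs i line col (by omega) hn0 (hn1 (by omega)) hlci
              rw [if_neg hdep, if_pos rfl]
              refine ⟨hcs, s, l, c, o, hss, hseg,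
                g1, g2, by omega, g4, g5, ?_, g7⟩
              exact pvNoNl_mono cs o (i+2) _ (pvNoNl_to2 cs o i g6 hi hn0 hn1)
                (by omega)
          · rw [if_neg hesc, if_neg hesc]
            by_cases hq : cs.getD i ' ' = '"'
            · -- closing quote
              rw [if_pos hq, if_pos hq, hss, hseg]
              simp only []
              have hn0 : ¬ cs[i]? = some '\n' := by
                rw [hchar, hq]; decide
              have hout' : ranges ++ pvSplitRangeA cs s (i+1) "string" =
                  pvEmit out l c o (i+1) "string" := by
                rw [pvSplitRangeA_eq_spec cs s (i+1) "string" (by omega)]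
                exact pvSegClose cs i s o l c "string" ranges out (i+1) hsi (by omega)
                  (by omega) (pvNoNl_to1 cs o i g6 hi hn0)
              rw [hout']
              apply ih (i+1) depth cstart none false line (col+1) none
                (pvEmit out l c o (i+1) "string") (pvEmit out l c o (i+1) "string")
                hf0 (by omega)
              refine ⟨fun h2 => pvPos_one_not cs i line col hi hn0 hlci, ?_⟩
              rw [if_neg hdep, if_neg (by simp : ¬ (false = true))]
              exact ⟨hcs, rfl, rfl, rfl⟩
            · rw [if_neg hq, if_neg hq]
              by_cases hnl : cs.getD i ' ' = '\n'
              · -- newline inside a string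
                rw [if_pos hnl, hseg]
                simp only []
                have hnlo : cs[i]? = some '\n' := by rw [hchar, hnl]
                have hout' : pvEmit out l c o i "string" =
                    ranges ++ pvSplitSpec cs (i+1) "string" s :=
                  pvSegNl cs i s o l c "string" ranges out i hsi hnlo g3 (hmin ▸ g6)
                apply ih (i+1) depth cstart sstart true (line+1) 0
                  (some (line+1, 0, i+1)) ranges (pvEmit out l c o i "string") hf0 (by omega)
                refine ⟨fun h2 => pvPos_one_nl cs i line col hi hnlo hlci, ?_⟩
                rw [if_neg hdep, if_pos rfl]
                refine ⟨hcs, s, line+1, 0, i+1, hss, rfl,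
                  by omega, by omega, le_rfl, Or.inr ⟨by omega, by simpa using hnlo⟩,
                  pvPos_one_nl cs i line col hi hnlo hlci,
                  pvNoNl_empty cs (i+1) _ (by omega), hout'⟩
              · -- ordinary character inside a string
                rw [if_neg hnl]
                have hn0 : ¬ cs[i]? = some '\n' := by
                  rw [hchar]
                  intro h2
                  exact hnl (Option.some.inj h2)
                apply ih (i+1) depth cstart sstart true line (col+1) seg ranges out
                  hf0 (by omega)
                refine ⟨fun h2 => pvPos_one_not cs i line col hi hn0 hlci, ?_⟩
                rw [if_neg hdep, if_pos rfl]
                refine ⟨hcs, s, l, c, o, hss, hseg,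
                  g1, g2, by omega, g4, g5, ?_, g7⟩
                exact pvNoNl_mono cs o (i+1) _ (pvNoNl_to1 cs o i g6 hi hn0) (by omega)
        | false =>
          rw [if_neg (by simp : ¬ (false = true))] at hstate
          obtain ⟨hcs, hss, hseg, hout⟩ := hstate
          rw [if_neg (by simp : ¬ (false = true)), if_neg (by simp : ¬ (false = true)), hseg]
          by_cases hp1 : PySem.List.slice cs (some (i:Int)) (some ((i:Int)+2)) = ['(', '*']
          · -- opening "(*"
            obtain ⟨hc0, hi1, hc1⟩ := (pvPair_eq cs i hi '(' '*').mp hp1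
            have hbB : cs.getD i ' ' = '(' ∧ i + 1 < cs.length ∧ cs.getD (i+1) ' ' = '*' :=
              ⟨hc0, hi1, hc1⟩
            rw [if_pos hp1, if_pos hbB]
            have hn0 : ¬ cs[i]? = some '\n' := pvNotNl_of cs i _ hchar (by rw [hc0]; decide)
            have hn1 : ¬ cs[i+1]? = some '\n' :=
              pvNotNl_of cs (i+1) _ (pvGetD_some cs (i+1) hi1) (by rw [hc1]; decide)
            apply ih (i+2) 1 (some i) sstart false line (col+2) (some (line, col, i))
              ranges out hf0 (by omega)
            refine ⟨fun h2 => pvPos_two_not cs i line col hi1 hn0 hn1 hlci, ?_⟩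
            rw [if_pos (by omega : (1:Nat) ≠ 0)]
            refine ⟨rfl, hss, i, line, col, i, rfl, rfl,
              le_rfl, by omega, by omega, Or.inl rfl, hlci, ?_, ?_⟩
            · exact pvNoNl_mono cs i (i+2) _
                (pvNoNl_to2 cs i i (pvNoNl_empty cs i _ (by omega)) hi hn0 (fun _ => hn1))
                (by omega)
            · rw [pvSplitSpec_nil cs i "comment" i le_rfl, hout]
              simp
          · have hbN1 : ¬ (cs.getD i ' ' = '(' ∧ i + 1 < cs.length ∧ cs.getD (i+1) ' ' = '*') :=
              fun hb => hp1 ((pvPair_eq cs i hi '(' '*').mpr hb)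
            rw [if_neg hp1, if_neg hbN1]
            by_cases hq : cs.getD i ' ' = '"'
            · -- opening quote
              rw [if_pos hq, if_pos hq]
              have hn0 : ¬ cs[i]? = some '\n' := pvNotNl_of cs i _ hchar (by rw [hq]; decide)
              apply ih (i+1) depth cstart (some i) true line (col+1) (some (line, col, i))
                ranges out hf0 (by omega)
              refine ⟨fun h2 => pvPos_one_not cs i line col hi hn0 hlci, ?_⟩
              rw [if_neg hdep, if_pos rfl]
              refine ⟨hcs, i, line, col, i, rfl, rfl,
                le_rfl, by omega, by omega, Or.inl rfl, hlci, ?_, ?_⟩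
              · exact pvNoNl_mono cs i (i+1) _ (pvNoNl_to1 cs i i (pvNoNl_empty cs i _ (by omega)) hi hn0)
                  (by omega)
              · rw [pvSplitSpec_nil cs i "string" i le_rfl, hout]
                simp
            · rw [if_neg hq, if_neg hq]
              by_cases hnl : cs.getD i ' ' = '\n'
              · -- newline outside any range
                rw [if_pos hnl]
                have hnlo : cs[i]? = some '\n' := by rw [hchar, hnl]
                apply ih (i+1) depth cstart sstart false (line+1) 0 none ranges out
                  hf0 (by omega)
                refine ⟨fun h2 => pvPos_one_nl cs i line col hi hnlo hlci, ?_⟩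
                rw [if_neg hdep, if_neg (by simp : ¬ (false = true))]
                exact ⟨hcs, hss, rfl, hout⟩
              · -- ordinary character outside any range
                rw [if_neg hnl]
                have hn0 : ¬ cs[i]? = some '\n' := by
                  rw [hchar]
                  intro h2
                  exact hnl (Option.some.inj h2)
                apply ih (i+1) depth cstart sstart false line (col+1) none ranges out
                  hf0 (by omega)
                refine ⟨fun h2 => pvPos_one_not cs i line col hi hn0 hlci, ?_⟩
                rw [if_neg hdep, if_neg (by simp : ¬ (false = true))]
                exact ⟨hcs, hss, rfl, hout⟩
    · -- i ≥ cs.length : end of the loop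
      rw [if_neg hi, if_neg hi]
      have hmin : min i cs.length = cs.length := by omega
      by_cases hdep : depth ≠ 0
      · rw [if_pos hdep] at hstate
        obtain ⟨hinstr, hsstart, s, l, c, o, hcs, hseg, hsi⟩ := hstate
        obtain ⟨g1, g2, g3, g4, g5, g6, g7⟩ := hsi
        rw [hmin] at g6
        rw [if_pos hdep, hcs, hseg, hinstr]
        simp only []
        rw [if_neg (by simp : ¬ (false = true)), if_pos hdep]
        rw [pvSplitRangeA_eq_spec cs s cs.length "comment" le_rfl]
        exact pvSegClose cs i s o l c "comment" ranges out cs.length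
          ⟨g1, g2, g3, g4, g5, by rw [hmin]; exact g6, g7⟩ g2 le_rfl g6
      · rw [if_neg hdep] at hstate
        rw [if_neg hdep]
        cases instr with
        | true =>
          rw [if_pos rfl] at hstate
          obtain ⟨hcs, s, l, c, o, hss, hseg, hsi⟩ := hstate
          obtain ⟨g1, g2, g3, g4, g5, g6, g7⟩ := hsi
          rw [hmin] at g6
          rw [if_pos rfl, hss, hseg]
          simp only []
          rw [if_neg hdep]
          rw [pvSplitRangeA_eq_spec cs s cs.length "string" le_rfl]
          exact pvSegClose cs i s o l c "string" ranges out cs.length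
            ⟨g1, g2, g3, g4, g5, by rw [hmin]; exact g6, g7⟩ g2 le_rfl g6
        | false =>
          rw [if_neg (by simp : ¬ (false = true))] at hstate
          obtain ⟨hcs, hss, hseg, hout⟩ := hstate
          rw [if_neg (by simp : ¬ (false = true)), hseg, hout]

-- ===== VERDICT (by name: the statement is the Claim_ definition above) =====
theorem comment_and_string_ranges_py_spec : Claim_equal_comment_and_string_ranges_py := by
  intro text _
  show comment_and_string_ranges_py text = comment_and_string_ranges_py_alt text
  unfold comment_and_string_ranges_py comment_and_string_ranges_py_alt
  apply pvMain text.toList (text.toList.length + 1) 0 0 none none false 0 0 none [] []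
    (by omega) (by omega)
  refine ⟨fun _ => (pvPosOf_zero text.toList).symm, ?_⟩
  rw [if_neg (by omega : ¬ ((0:Nat) ≠ 0)), if_neg (by simp : ¬ (false = true))]
  exact ⟨rfl, rfl, rfl, rfl⟩
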